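-- pv_equiv track=rewrite | github.com/leynos/nc-prompt-tools | nc_prompt_tools/prompt_lint.py | parse_braced_expressions
-- ===== SOURCE A (Python) =====
-- class IllegalNestingError(Exception):
--     """
--     Raised when braces are nested (which is disallowed)
--     """
--
-- class BraceMismatchError(Exception):
--     """Raised when braces are unbalanced or mismatched."""
--
-- def parse_braced_expressions(
--     file_content: str,
-- ) -> list[tuple[int, int, str]]:
--     """
--     Extract all top-level braced expressions from the file content,
--     along with their start and end indices in the original string.
--
--     Since the problem statement guarantees that:
--     1. Braced expressions do not nest.
--     2. Parentheses are only considered part of the language inside braces.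
--
--     Parameters
--     ----------
--     file_content : str
--         The full contents of the file as a single string.
--
--     Returns
--     -------
--     list of tuple of (int, int, str)
--         Each tuple contains:
--         - The index of the '{' character (start index).
--         - The index of the '}' character (end index).
--         - The contents (i.e. everything between '{' and '}').
--
--     Raises
--     ------
--     IllegalNestingError
--         If nested braces or unmatched braces are encountered.
--     """
--     expressions: list[tuple[int, int, str]] = []
--     brace_buffer: list[str] = []
--     inside_brace = False
--     brace_start_index = -1
--
--     for i, char in enumerate(file_content):
--         if char == "{":
--             if inside_brace:
--                 # Braced expressions cannot contain other braces.
--                 raise IllegalNestingError(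
--                     "Nested braces encountered, which is not allowed."
--                 )
--             inside_brace = True
--             brace_start_index = i
--             brace_buffer = []
--         elif char == "}":
--             if not inside_brace:
--                 # Unmatched closing brace
--                 raise BraceMismatchError(
--                     "Encountered a closing brace without an opening brace."
--                 )
--             inside_brace = False
--             expressions.append((brace_start_index, i, "".join(brace_buffer)))
--             brace_buffer = []
--         else:
--             if inside_brace:
--                 brace_buffer.append(char)
--
--     if inside_brace:
--         # We opened a brace but never closed it
--         raise BraceMismatchError("Unmatched opening brace found in file.")
--
--     return expressions
-- ===== SOURCE B (Python) =====
-- class IllegalNestingError(Exception):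
--     """Raised when braces are nested (which is disallowed)"""
--
-- class BraceMismatchError(Exception):
--     """Raised when braces are unbalanced or mismatched."""
--
-- def parse_braced_expressions(file_content):
--     """Brace-seeking cursor: jump between braces with str.find instead of a
--     per-character state machine."""
--     expressions = []
--     pos = 0
--     n = len(file_content)
--     while pos < n:
--         open_idx = file_content.find("{", pos)
--         close_idx = file_content.find("}", pos)
--         if open_idx == -1:
--             if close_idx != -1:
--                 raise BraceMismatchError(
--                     "Encountered a closing brace without an opening brace."
--                 )
--             break
--         if close_idx != -1 and close_idx < open_idx:
--             raise BraceMismatchError(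
--                 "Encountered a closing brace without an opening brace."
--             )
--         close_idx = file_content.find("}", open_idx + 1)
--         next_open = file_content.find("{", open_idx + 1)
--         if next_open != -1 and (close_idx == -1 or next_open < close_idx):
--             raise IllegalNestingError(
--                 "Nested braces encountered, which is not allowed."
--             )
--         if close_idx == -1:
--             raise BraceMismatchError("Unmatched opening brace found in file.")
--         expressions.append((open_idx, close_idx, file_content[open_idx + 1:close_idx]))
--         pos = close_idx + 1
--     return expressions
-- ===== Notes on version B (the rewrite author's own statement) =====
-- stated objective: idiomatic
-- what changed: Replaced the per-character inside-brace/buffer state machine with a cursor loop that jumps between braces via str.find and takes each expression as a slice file_content[open_idx+1:close_idx], preserving exception types and order.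
import Mathlib
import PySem

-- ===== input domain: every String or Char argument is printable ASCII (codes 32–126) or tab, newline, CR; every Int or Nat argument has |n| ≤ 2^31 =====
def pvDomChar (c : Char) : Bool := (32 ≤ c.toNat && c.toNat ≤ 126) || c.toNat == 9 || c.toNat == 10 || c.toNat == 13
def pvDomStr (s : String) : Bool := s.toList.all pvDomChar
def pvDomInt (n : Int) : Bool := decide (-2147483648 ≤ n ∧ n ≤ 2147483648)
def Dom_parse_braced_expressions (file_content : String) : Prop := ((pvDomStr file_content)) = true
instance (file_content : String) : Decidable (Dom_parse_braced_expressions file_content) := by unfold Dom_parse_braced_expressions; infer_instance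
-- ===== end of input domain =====

-- B replaces A's per-character state machine by a cursor loop that jumps between
-- braces with str.find and slices each expression out (objective: idiomatic).

-- ===== PORT A =====
-- the for-loop over enumerate(file_content) with state (inside_brace, brace_start_index,
-- brace_buffer, expressions); on the paths where Python raises the port returns the
-- expressions accumulated so far (those inputs are excluded by Pre_).
def pvGoA : List Char → Nat → Bool → Int → List Char → List (Int × Int × String) → List (Int × Int × String)
  | [], _, _, _, _, acc => acc
  | c :: rest, i, inside, start, buf, acc =>
    if c = '{' then
      if inside then acc  -- raise IllegalNestingError
      else pvGoA rest (i + 1) true (i : Int) [] acc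
    else if c = '}' then
      if inside then pvGoA rest (i + 1) false start [] (acc ++ [(start, (i : Int), String.ofList buf)])
      else acc  -- raise BraceMismatchError
    else pvGoA rest (i + 1) inside start (if inside then buf ++ [c] else buf) acc

def parse_braced_expressions (file_content : String) : List (Int × Int × String) :=
  pvGoA file_content.toList 0 false (-1) [] []

-- ===== PORT B =====
-- Source B's while-loop over a position cursor; fuel = len + 1 suffices because pos
-- strictly increases each iteration; raising paths return the list built so far.
def pvGoB (fuel : Nat) (cs : List Char) (pos : Nat) (acc : List (Int × Int × String)) : List (Int × Int × String) :=
  match fuel with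
  | 0 => acc
  | fuel + 1 =>
    if pos < cs.length then
      let o := PySem.Chars.findFrom cs ['{'] (pos : Int) none
      let cl := PySem.Chars.findFrom cs ['}'] (pos : Int) none
      if o = -1 then acc  -- raise if cl ≠ -1, else break: both return acc
      else if cl ≠ -1 ∧ cl < o then acc  -- raise BraceMismatchError
      else
        let cl2 := PySem.Chars.findFrom cs ['}'] (o + 1) none
        let no := PySem.Chars.findFrom cs ['{'] (o + 1) none
        if no ≠ -1 ∧ (cl2 = -1 ∨ no < cl2) then acc  -- raise IllegalNestingError
        else if cl2 = -1 then acc  -- raise BraceMismatchError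
        else pvGoB fuel cs (cl2.toNat + 1)
          (acc ++ [(o, cl2, String.ofList (PySem.Chars.slice cs (some (o + 1)) (some cl2)))])
    else acc

def parse_braced_expressions_alt (file_content : String) : List (Int × Int × String) :=
  pvGoB (file_content.toList.length + 1) file_content.toList 0 []

-- ===== PRECONDITION & SPEC =====
def pvIsBrace (c : Char) : Bool := c == '{' || c == '}'

-- Pre_ = exactly the inputs where A returns (no exception): the brace characters of
-- the string, in order, form the alternating pattern { } { } … (complete pairs).
def Pre_parse_braced_expressions (file_content : String) : Prop :=
  (file_content.toList.filter pvIsBrace)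
    = (List.replicate ((file_content.toList.filter pvIsBrace).length / 2) ['{', '}']).flatten
instance (file_content : String) : Decidable (Pre_parse_braced_expressions file_content) := by
  unfold Pre_parse_braced_expressions; infer_instance

def pvWitness_parse_braced_expressions : String := "a{b}c{}d"

def Spec_parse_braced_expressions (file_content : String) (out : List (Int × Int × String)) : Prop := out = parse_braced_expressions_alt file_content
instance (file_content : String) (out : List (Int × Int × String)) : Decidable (Spec_parse_braced_expressions file_content out) := by unfold Spec_parse_braced_expressions; infer_instance

-- ===== CLAIM (what is proved, stated in full; the proofs are below) =====
def Claim_equal_parse_braced_expressions : Prop := ∀ (file_content : String), Dom_parse_braced_expressions file_content → Pre_parse_braced_expressions file_content → Spec_parse_braced_expressions file_content (parse_braced_expressions file_content)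

-- ===== LEMMAS AND PROOFS =====

lemma pv_singleton_prefix (c : Char) (l : List Char) : [c] <+: l ↔ l[0]? = some c := by
  cases l with
  | nil => simp
  | cons a t => simp [List.cons_prefix_cons, eq_comm]

lemma pv_prefix_drop (c : Char) (l : List Char) (j : Nat) : [c] <+: l.drop j ↔ l[j]? = some c := by
  rw [pv_singleton_prefix]
  simp [List.getElem?_drop]

lemma pvFindAbsent (c : Char) (l : List Char) (h : c ∉ l) : PySem.Chars.find l [c] = -1 := by
  rw [PySem.Chars.find_eq_neg_one_iff, List.singleton_infix_iff]
  exact h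

lemma pvFindFirst (c : Char) (p t : List Char) (hp : c ∉ p) :
    PySem.Chars.find (p ++ c :: t) [c] = (p.length : Int) := by
  have hin : ([c] : List Char) <:+: (p ++ c :: t) := by
    rw [List.singleton_infix_iff]; simp
  have hne := (PySem.Chars.find_ne_neg_one_iff (p ++ c :: t) [c]).mpr hin
  have h0 : 0 ≤ PySem.Chars.find (p ++ c :: t) [c] := (PySem.Chars.find_nonneg_iff _ _).mpr hin
  obtain ⟨hpre, hmin⟩ := PySem.Chars.find_spec h0
  rw [pv_prefix_drop] at hpre
  set f := (PySem.Chars.find (p ++ c :: t) [c]).toNat with hf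
  have hle : ¬ p.length < f := by
    intro hlt
    exact hmin p.length hlt ((pv_prefix_drop _ _ _).mpr (by simp))
  have hge : ¬ f < p.length := by
    intro hlt
    rw [List.getElem?_append_left hlt] at hpre
    exact hp (List.mem_of_getElem? hpre)
  have : f = p.length := by omega
  omega

lemma pvFindLower (c d : Char) (p t : List Char) (hp : c ∉ p) (hd : d ≠ c) :
    PySem.Chars.find (p ++ d :: t) [c] = -1 ∨ (p.length : Int) < PySem.Chars.find (p ++ d :: t) [c] := by
  by_cases h : PySem.Chars.find (p ++ d :: t) [c] = -1
  · exact Or.inl h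
  right
  have h0 : 0 ≤ PySem.Chars.find (p ++ d :: t) [c] := by
    rw [PySem.Chars.find_nonneg_iff, ← PySem.Chars.find_ne_neg_one_iff]; exact h
  obtain ⟨hpre, hmin⟩ := PySem.Chars.find_spec h0
  rw [pv_prefix_drop] at hpre
  set f := (PySem.Chars.find (p ++ d :: t) [c]).toNat with hf
  have h1 : ¬ f < p.length := by
    intro hlt
    rw [List.getElem?_append_left hlt] at hpre
    exact hp (List.mem_of_getElem? hpre)
  have h2 : f ≠ p.length := by
    intro he
    rw [he] at hpre
    simp at hpre
    exact hd hpre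
  omega
lemma pvFilterDecomp (P : Char → Bool) :
    ∀ (l : List Char) (c : Char) (m : List Char), l.filter P = c :: m →
      ∃ p t, l = p ++ c :: t ∧ p.filter P = [] ∧ t.filter P = m := by
  intro l
  induction l with
  | nil => intro c m h; simp at h
  | cons a l ih =>
    intro c m h
    by_cases ha : P a
    · rw [List.filter_cons_of_pos ha] at h
      obtain ⟨rfl, rfl⟩ := List.cons.inj h
      exact ⟨[], l, by simp⟩
    · rw [List.filter_cons_of_neg (by simpa using ha)] at h
      obtain ⟨p, t, rfl, hp, ht⟩ := ih c m h
      exact ⟨a :: p, t, by simp [List.filter_cons_of_neg (by simpa using ha), hp, ht]⟩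

lemma pvNotMemOfFilterNil (P : Char → Bool) (l : List Char) (h : l.filter P = []) (c : Char)
    (hc : P c = true) : c ∉ l := by
  intro hm
  have := List.filter_eq_nil_iff.mp h c hm
  simp [hc] at this

lemma pvGoA_free : ∀ (l : List Char) (i : Nat) (s : Int) (b : List Char) acc,
    l.filter pvIsBrace = [] → pvGoA l i false s b acc = acc := by
  intro l
  induction l with
  | nil => intro i s b acc _; rfl
  | cons a l ih =>
    intro i s b acc h
    rw [List.filter_eq_nil_iff] at h
    have ha := h a (by simp)
    simp [pvIsBrace] at ha
    rw [pvGoA, if_neg ha.1, if_neg ha.2]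
    exact ih _ _ _ _ (List.filter_eq_nil_iff.mpr fun x hx => h x (by simp [hx]))

lemma pvGoA_inside : ∀ (q : List Char) (r : List Char) (j : Nat) (st : Int) (buf : List Char) acc,
    q.filter pvIsBrace = [] →
    pvGoA (q ++ '}' :: r) j true st buf acc
      = pvGoA r (j + q.length + 1) false st [] (acc ++ [(st, ((j + q.length : Nat) : Int), String.ofList (buf ++ q))]) := by
  intro q
  induction q with
  | nil => intro r j st buf acc _; simp [pvGoA]
  | cons a q ih =>
    intro r j st buf acc h
    rw [List.filter_eq_nil_iff] at h
    have ha := h a (by simp)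
    simp [pvIsBrace] at ha
    rw [List.cons_append, pvGoA, if_neg ha.1, if_neg ha.2, if_pos rfl,
      ih r (j+1) st (buf ++ [a]) acc (List.filter_eq_nil_iff.mpr fun x hx => h x (by simp [hx]))]
    have e1 : j + 1 + q.length = j + (a :: q).length := by simp; omega
    have e2 : buf ++ [a] ++ q = buf ++ a :: q := by simp
    rw [e1, e2]

lemma pvGoA_pair (p q r : List Char) (i : Nat) (s : Int) (b : List Char) (acc : List (Int × Int × String))
    (hp : p.filter pvIsBrace = []) (hq : q.filter pvIsBrace = []) :
    pvGoA (p ++ '{' :: (q ++ '}' :: r)) i false s b acc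
      = pvGoA r (i + p.length + q.length + 2) false ((i + p.length : Nat) : Int) []
          (acc ++ [(((i + p.length : Nat) : Int), ((i + p.length + q.length + 1 : Nat) : Int), String.ofList q)]) := by
  induction p generalizing i with
  | nil =>
    rw [List.nil_append, pvGoA, if_pos rfl, if_neg (by simp),
      pvGoA_inside q r (i+1) (i : Int) [] acc hq]
    simp only [List.length_nil, Nat.add_zero]
    have e1 : i + 1 + q.length + 1 = i + q.length + 2 := by omega
    have e2 : i + 1 + q.length = i + q.length + 1 := by omega
    rw [e1, e2]
    simp
  | cons a p ih =>
    rw [List.filter_eq_nil_iff] at hp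
    have ha := hp a (by simp)
    simp [pvIsBrace] at ha
    rw [List.cons_append, pvGoA, if_neg ha.1, if_neg ha.2]
    simp only [Bool.false_eq_true, if_false]
    rw [ih (i+1) (List.filter_eq_nil_iff.mpr fun x hx => hp x (by simp [hx]))]
    have e1 : i + 1 + p.length = i + (a :: p).length := by simp; omega
    rw [e1]

lemma pvMain : ∀ (k : Nat) (cs : List Char) (pos fuel : Nat) (s0 : Int) (b0 : List Char) acc,
    pos ≤ cs.length → k < fuel →
    (cs.drop pos).filter pvIsBrace = (List.replicate k (['{', '}'] : List Char)).flatten →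
    pvGoB fuel cs pos acc = pvGoA (cs.drop pos) pos false s0 b0 acc := by
  intro k
  induction k with
  | zero =>
    intro cs pos fuel s0 b0 acc hpos hfuel hfilter
    simp only [List.replicate, List.flatten_nil] at hfilter
    rw [pvGoA_free _ _ _ _ _ hfilter]
    obtain ⟨f, rfl⟩ : ∃ f, fuel = f + 1 := ⟨fuel - 1, by omega⟩
    by_cases h : pos < cs.length
    · have ho : PySem.Chars.findFrom cs ['{'] (pos : Int) none = -1 := by
        rw [PySem.Chars.findFrom_natCast cs ['{'] pos hpos,
          pvFindAbsent '{' _ (pvNotMemOfFilterNil _ _ hfilter _ (by decide))]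
        simp
      simp [pvGoB, h, ho]
    · simp [pvGoB, h]
  | succ k ih =>
    intro cs pos fuel s0 b0 acc hpos hfuel hfilter
    rw [List.replicate_succ, List.flatten_cons] at hfilter
    obtain ⟨p, t, hsplit, hp, ht⟩ := pvFilterDecomp pvIsBrace _ _ _ hfilter
    obtain ⟨q, r, rfl, hq, hr⟩ := pvFilterDecomp pvIsBrace _ _ _ ht
    have hlen : (cs.drop pos).length = cs.length - pos := List.length_drop
    have hlen2 : cs.length - pos = p.length + q.length + r.length + 2 := by
      rw [← hlen, hsplit]; simp; omega
    have hposlt : pos < cs.length := by omega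
    have hnp1 : '{' ∉ p := pvNotMemOfFilterNil _ _ hp _ (by decide)
    have hnp2 : '}' ∉ p := pvNotMemOfFilterNil _ _ hp _ (by decide)
    have hnq1 : '{' ∉ q := pvNotMemOfFilterNil _ _ hq _ (by decide)
    have hnq2 : '}' ∉ q := pvNotMemOfFilterNil _ _ hq _ (by decide)
    obtain ⟨f, rfl⟩ : ∃ f, fuel = f + 1 := ⟨fuel - 1, by omega⟩
    -- the four find results
    have ho : PySem.Chars.findFrom cs ['{'] (pos : Int) none = ((pos + p.length : Nat) : Int) := by
      rw [PySem.Chars.findFrom_natCast cs ['{'] pos hpos, hsplit, pvFindFirst '{' p _ hnp1]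
      rw [if_neg (by omega)]; push_cast; ring
    have hcl : PySem.Chars.findFrom cs ['}'] (pos : Int) none
        = ((pos + p.length + q.length + 1 : Nat) : Int) := by
      have hre : p ++ '{' :: (q ++ '}' :: r) = (p ++ '{' :: q) ++ '}' :: r := by simp
      have hnm : '}' ∉ p ++ '{' :: q := by simp [hnp2, hnq2]
      rw [PySem.Chars.findFrom_natCast cs ['}'] pos hpos, hsplit, hre, pvFindFirst '}' _ _ hnm]
      rw [if_neg (by simp; omega)]
      simp only [List.length_append, List.length_cons]
      push_cast; ring
    have hdrop2 : cs.drop (pos + (p.length + 1)) = q ++ '}' :: r := by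
      rw [← List.drop_drop, hsplit]
      have : p ++ '{' :: (q ++ '}' :: r) = (p ++ ['{']) ++ (q ++ '}' :: r) := by simp
      rw [this, List.drop_left' (by simp)]
    have hk2 : pos + (p.length + 1) ≤ cs.length := by omega
    have hco : ((pos + p.length : Nat) : Int) + 1 = ((pos + (p.length + 1) : Nat) : Int) := by push_cast; ring
    have hcl2 : PySem.Chars.findFrom cs ['}'] (((pos + p.length : Nat) : Int) + 1) none
        = ((pos + p.length + q.length + 1 : Nat) : Int) := by
      rw [hco, PySem.Chars.findFrom_natCast cs ['}'] _ hk2, hdrop2, pvFindFirst '}' q _ hnq2]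
      rw [if_neg (by omega)]; push_cast; ring
    have hno : PySem.Chars.findFrom cs ['{'] (((pos + p.length : Nat) : Int) + 1) none = -1 ∨
        ((pos + p.length + q.length + 1 : Nat) : Int) < PySem.Chars.findFrom cs ['{'] (((pos + p.length : Nat) : Int) + 1) none := by
      rw [hco, PySem.Chars.findFrom_natCast cs ['{'] _ hk2, hdrop2]
      rcases pvFindLower '{' '}' q r hnq1 (by decide) with h1 | h1
      · left; rw [h1]; simp
      · right; rw [if_neg (by omega)]; push_cast; omega
    have hslice : PySem.Chars.slice cs (some (((pos + p.length : Nat) : Int) + 1))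
        (some ((pos + p.length + q.length + 1 : Nat) : Int)) = q := by
      rw [hco]
      have : ((pos + p.length + q.length + 1 : Nat) : Int) = ((pos + (p.length + 1) + q.length : Nat) : Int) := by push_cast; ring
      rw [this, PySem.Chars.slice_eq_listSlice, PySem.List.slice_natCast, hdrop2]
      have : pos + (p.length + 1) + q.length - (pos + (p.length + 1)) = q.length := by omega
      rw [this, List.take_left' rfl]
    have hdrop3 : cs.drop (pos + p.length + q.length + 1 + 1) = r := by
      have e : pos + p.length + q.length + 1 + 1 = pos + (p.length + 1 + (q.length + 1)) := by omega
      rw [e, ← List.drop_drop, hsplit]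
      have : p ++ '{' :: (q ++ '}' :: r) = (p ++ '{' :: (q ++ ['}'])) ++ r := by simp
      rw [this, List.drop_left' (by simp; omega)]
    -- reduce B one step
    rw [pvGoB]
    simp only [if_pos hposlt, ho, hcl, hcl2]
    rw [if_neg (by omega)]
    rw [if_neg (by omega)]
    rw [if_neg (by
      rcases hno with h1 | h1 <;>
        · intro hc
          obtain ⟨hne, hor⟩ := hc
          rcases hor with h2 | h2 <;> omega)]
    rw [if_neg (by omega)]
    rw [hslice]
    have htn : (((pos + p.length + q.length + 1 : Nat) : Int)).toNat + 1 = pos + p.length + q.length + 1 + 1 := by omega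
    rw [htn]
    rw [ih cs _ f ((pos + p.length : Nat) : Int) [] _ (by omega) (by omega) (by rw [hdrop3]; exact hr)]
    rw [hdrop3]
    -- reduce A one step
    rw [hsplit, pvGoA_pair p q r pos s0 b0 acc hp hq]

-- ===== VERDICT (by name: the statement is the Claim_ definition above) =====
theorem parse_braced_expressions_spec : Claim_equal_parse_braced_expressions := by
  intro s _ hpre
  unfold Pre_parse_braced_expressions at hpre
  unfold Spec_parse_braced_expressions parse_braced_expressions parse_braced_expressions_alt
  have hk : (s.toList.filter pvIsBrace).length / 2 < s.toList.length + 1 := by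
    have := List.length_filter_le pvIsBrace s.toList
    omega
  exact (pvMain ((s.toList.filter pvIsBrace).length / 2) s.toList 0 (s.toList.length + 1)
    (-1) [] [] (Nat.zero_le _) hk (by rw [List.drop_zero]; exact hpre)).symm
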